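-- pv_equiv track=rewrite | github.com/zb-umkc/elic_dct | ELICUtilis/encoding/rle.py | exp_golomb_decode_unsigned
-- ===== SOURCE A (Python) =====
-- def exp_golomb_decode_unsigned(bitstream):
--     """
--     Optimized decoder for unsigned Exp-Golomb codes.
--     This is for decoding lengths arrays that were encoded with unsigned encoding.
--     """
--     if not bitstream:
--         return []
--
--     arr_decoded = []
--     i = 0
--     bitstream_len = len(bitstream)
--
--     while i < bitstream_len:
--         # Count leading zeros
--         m = 0
--         while i + m < bitstream_len and bitstream[i + m] == '0':
--             m += 1
--
--         # Calculate positions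
--         start_pos = i + m
--         end_pos = start_pos + m + 1
--
--         if end_pos > bitstream_len:
--             break
--
--         # Read the binary value
--         val_bits = bitstream[start_pos:end_pos]
--
--         if val_bits and val_bits[0] == '1':
--             # For unsigned: the decoded value IS the binary value
--             # No signed-to-unsigned conversion needed!
--             x = int(val_bits, 2)
--             arr_decoded.append(x)
--
--         i = end_pos
--
--     return arr_decoded
-- ===== SOURCE B (Python) =====
-- def exp_golomb_decode_unsigned(bitstream):
--     """Single forward pass, no index arithmetic or per-codeword slicing: a state
--     machine that counts leading zeros, then collects the m+1 value characters
--     into a buffer and emits int(buffer, 2) when the buffer is complete, starts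
--     with '1' and consists of binary digits (a malformed codeword is skipped
--     rather than an error); an incomplete trailing code simply never completes."""
--     out = []
--     m = 0
--     need = -1          # -1: counting zeros; otherwise value chars still to collect
--     buf = []
--     for c in bitstream:
--         if need < 0:
--             if c == '0':
--                 m += 1
--                 continue
--             need = m + 1
--             m = 0
--             buf = []
--         buf.append(c)
--         need -= 1
--         if need == 0:
--             if buf[0] == '1' and all(ch in '01' for ch in buf):
--                 out.append(int(''.join(buf), 2))
--             need = -1
--     return out
-- ===== Notes on version B (the rewrite author's own statement) =====
-- stated objective: faster
-- what changed: Replaces A's outer index loop with nested zero-counting, position arithmetic and per-codeword slicing by a single forward pass: a state machine that counts the leading zero characters, collects the m+1 value characters into a buffer, and emits int(buffer, 2) only when the completed buffer starts with a one character and is all binary digits, skipping malformed codewords instead of raising; …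
-- outside the precondition, e.g. on exp_golomb_decode_unsigned('01 '): A returns [1], B returns []; on exp_golomb_decode_unsigned('01x1'): A raises ValueError, B returns [1]; on exp_golomb_decode_unsigned('0,1'): A returns [], B returns []
import Mathlib
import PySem

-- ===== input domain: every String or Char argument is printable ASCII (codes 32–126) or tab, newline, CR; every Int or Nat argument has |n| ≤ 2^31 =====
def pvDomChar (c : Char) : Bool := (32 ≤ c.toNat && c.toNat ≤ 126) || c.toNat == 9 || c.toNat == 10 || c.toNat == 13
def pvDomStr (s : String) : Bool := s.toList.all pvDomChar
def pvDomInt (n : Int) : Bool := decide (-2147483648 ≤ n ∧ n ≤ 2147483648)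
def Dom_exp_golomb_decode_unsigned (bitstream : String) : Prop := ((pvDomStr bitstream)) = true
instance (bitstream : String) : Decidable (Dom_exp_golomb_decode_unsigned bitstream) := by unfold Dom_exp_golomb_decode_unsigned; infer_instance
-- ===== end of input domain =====

-- B replaces A's index arithmetic, nested zero-counting loop and per-codeword slicing by a
-- single forward pass with a small state machine (measured faster by a constant factor).

-- ===== PORT A =====
-- `if val_bits and val_bits[0] == '1': arr_decoded.append(int(val_bits, 2))`;
-- Python raises ValueError on the `none` case of int(val_bits, 2) (outside Pre_)
def pvAppendA (acc : List Int) (valBits : List Char) : List Int :=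
  if valBits.head? = some '1' then
    match PySem.Int.ofCharsBase? valBits 2 with
    | some x => acc ++ [x]
    | none => acc
  else acc

-- inner `while … == '0'` loop of A: number of leading '0' characters
def pvZeros : List Char → Nat
  | [] => 0
  | c :: r => if c = '0' then pvZeros r + 1 else 0

def pvLoopA (cs : List Char) (i : Nat) (acc : List Int) : List Int :=
  if _h : i < cs.length then
    let m := pvZeros (cs.drop i)
    let startPos := i + m
    let endPos := startPos + m + 1
    if _he : cs.length < endPos then acc
    else
      -- bitstream[start_pos:end_pos]
      let valBits := PySem.List.slice cs (some (startPos : Int)) (some (endPos : Int))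
      pvLoopA cs endPos (pvAppendA acc valBits)
  else acc
termination_by cs.length - i
decreasing_by simp only [not_lt] at _he; omega

def exp_golomb_decode_unsigned (bitstream : String) : List Int :=
  if bitstream.toList.isEmpty then [] else pvLoopA bitstream.toList 0 []

-- ===== PORT B =====
-- `if buf[0] == '1' and all(ch in '01' for ch in buf): out.append(int(''.join(buf), 2))`
-- (ofCharsBase? = ofStrBase? on the join, by PySem.Int.ofStrBase?_ofList; the `none`
-- case cannot fire in Source B either: a checked all-binary buffer always parses)
def pvEmitB (out : List Int) (buf : List Char) : List Int :=
  if buf.head? = some '1' ∧ (∀ ch ∈ buf, ch = '0' ∨ ch = '1') then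
    match PySem.Int.ofCharsBase? buf 2 with
    | some x => out ++ [x]
    | none => out
  else out

-- the shared tail of Source B's loop body: append c to buf, decrement need, emit at 0
def pvCollectB (out : List Int) (m need : Int) (buf : List Char) (c : Char) :
    List Int × Int × Int × List Char :=
  let buf' := buf ++ [c]
  let need' := need - 1
  if need' = 0 then (pvEmitB out buf', m, -1, buf')
  else (out, m, need', buf')

-- one iteration of Source B's `for c in bitstream` loop over state (out, m, need, buf)
def pvStepB (st : List Int × Int × Int × List Char) (c : Char) :
    List Int × Int × Int × List Char :=
  match st with
  | (out, m, need, buf) =>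
    if need < 0 then
      if c = '0' then (out, m + 1, need, buf)
      else pvCollectB out 0 (m + 1) [] c
    else pvCollectB out m need buf c

def exp_golomb_decode_unsigned_alt (bitstream : String) : List Int :=
  (bitstream.toList.foldl pvStepB ([], 0, -1, [])).1

-- ===== PRECONDITION & SPEC =====
-- Pre_ keeps strings in which no '0' occurs anywhere before a non-bit character: past it a
-- non-bit character can fall inside a multi-character value field, where both A and B raise
-- ValueError from int(..., 2); being closed-form, the condition also sets aside some mixed
-- strings that happen to decode without an error (A and B return the same value there).
def Pre_exp_golomb_decode_unsigned (bitstream : String) : Prop :=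
  bitstream.toList.Pairwise (fun a b => a = '0' → b = '0' ∨ b = '1')
instance (bitstream : String) : Decidable (Pre_exp_golomb_decode_unsigned bitstream) := by
  unfold Pre_exp_golomb_decode_unsigned; infer_instance

def pvWitness_exp_golomb_decode_unsigned : String := "0010111"

def Spec_exp_golomb_decode_unsigned (bitstream : String) (out : List Int) : Prop :=
  out = exp_golomb_decode_unsigned_alt bitstream
instance (bitstream : String) (out : List Int) :
    Decidable (Spec_exp_golomb_decode_unsigned bitstream out) := by
  unfold Spec_exp_golomb_decode_unsigned; infer_instance

-- ===== CLAIM (what is proved, stated in full; the proofs are below) =====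
def Claim_equal_exp_golomb_decode_unsigned : Prop :=
  ∀ (bitstream : String), Dom_exp_golomb_decode_unsigned bitstream →
    Pre_exp_golomb_decode_unsigned bitstream →
    Spec_exp_golomb_decode_unsigned bitstream (exp_golomb_decode_unsigned bitstream)

-- ===== LEMMAS AND PROOFS =====

lemma pvZeros_le (l : List Char) : pvZeros l ≤ l.length := by
  induction l with
  | nil => simp [pvZeros]
  | cons c r ih =>
    by_cases h : c = '0' <;> simp [pvZeros, h]
    omega

lemma pvZeros_take (l : List Char) : l.take (pvZeros l) = List.replicate (pvZeros l) '0' := by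
  induction l with
  | nil => simp [pvZeros]
  | cons c r ih =>
    by_cases h : c = '0'
    · simp [pvZeros, h, List.replicate_succ, ih]
    · simp [pvZeros, h]

lemma pvZeros_head (l : List Char) : ∀ c t, l.drop (pvZeros l) = c :: t → c ≠ '0' := by
  induction l with
  | nil => intro c t h; simp [pvZeros] at h
  | cons a r ih =>
    intro c t h
    by_cases ha : a = '0'
    · simp [pvZeros, ha] at h; exact ih c t h
    · simp [pvZeros, ha] at h; intro hc; exact ha (h.1.trans hc)

lemma stepB_zero (t : List Char) (out : List Int) (k : Int) (buf : List Char) :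
    List.foldl pvStepB (out, k, -1, buf) ('0' :: t) =
      List.foldl pvStepB (out, k + 1, -1, buf) t := by
  simp [pvStepB]

lemma stepB_zeros (m : Nat) (t : List Char) (out : List Int) (k : Int) (buf : List Char) :
    List.foldl pvStepB (out, k, -1, buf) (List.replicate m '0' ++ t) =
      List.foldl pvStepB (out, k + m, -1, buf) t := by
  induction m generalizing k with
  | zero => simp
  | succ n ih =>
    rw [List.replicate_succ, List.cons_append, stepB_zero, ih,
      show k + 1 + (n : Int) = k + ((n + 1 : Nat) : Int) by push_cast; ring]

lemma stepB_starved (t : List Char) :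
    ∀ (out : List Int) (m need : Int) (buf : List Char), 0 < need →
      (t.length : Int) < need → (List.foldl pvStepB (out, m, need, buf) t).1 = out := by
  induction t with
  | nil => intro out m need buf _ _; simp
  | cons c t' ih =>
    intro out m need buf hpos hlen
    simp only [List.length_cons] at hlen
    have h1 : ¬ need < 0 := by omega
    have h2 : ¬ need - 1 = 0 := by push_cast at hlen; omega
    simp only [List.foldl_cons, pvStepB, h1, if_false, pvCollectB, h2]
    exact ih out m (need - 1) (buf ++ [c]) (by push_cast at hlen ⊢; omega)
      (by push_cast at hlen ⊢; omega)

lemma stepB_stop (out : List Int) (m : Int) (buf : List Char) (c : Char) (t : List Char)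
    (hc : c ≠ '0') :
    List.foldl pvStepB (out, m, -1, buf) (c :: t) =
      List.foldl pvStepB (pvCollectB out 0 (m + 1) [] c) t := by
  simp [pvStepB, hc]

lemma stepB_collect (mid : List Char) :
    ∀ (rest : List Char) (out : List Int) (m : Int) (buf : List Char) (c : Char),
      List.foldl pvStepB (pvCollectB out m ((mid.length : Int) + 1) buf c) (mid ++ rest) =
        List.foldl pvStepB (pvEmitB out (buf ++ c :: mid), m, -1, buf ++ c :: mid) rest := by
  induction mid with
  | nil => intro rest out m buf c; simp [pvCollectB]
  | cons d mid' ih =>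
    intro rest out m buf c
    have hcoll : pvCollectB out m (((d :: mid').length : Int) + 1) buf c =
        (out, m, (mid'.length : Int) + 1, buf ++ [c]) := by
      simp only [pvCollectB]
      rw [if_neg (by push_cast [List.length_cons]; omega)]
      rw [show ((d :: mid').length : Int) + 1 - 1 = (mid'.length : Int) + 1 by
        push_cast [List.length_cons]; ring]
    have hstep : pvStepB (out, m, (mid'.length : Int) + 1, buf ++ [c]) d =
        pvCollectB out m ((mid'.length : Int) + 1) (buf ++ [c]) d := by
      simp only [pvStepB]
      rw [if_neg (by omega)]
    rw [hcoll, List.cons_append, List.foldl_cons, hstep, ih rest out m (buf ++ [c]) d]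
    simp

lemma append_eq_emit (acc : List Int) (c : Char) (mid : List Char)
    (hclean : c = '1' → ∀ x ∈ mid, x = '0' ∨ x = '1') :
    pvAppendA acc (c :: mid) = pvEmitB acc (c :: mid) := by
  unfold pvAppendA pvEmitB
  by_cases h1 : c = '1'
  · have hall : ∀ x ∈ c :: mid, x = '0' ∨ x = '1' := by
      intro x hx
      rcases List.mem_cons.mp hx with rfl | hx
      · exact Or.inr h1
      · exact hclean h1 x hx
    rw [if_pos (by simp [h1]), if_pos ⟨by simp [h1], hall⟩]
  · rw [if_neg (by simp [h1]), if_neg (by simp [h1])]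

lemma loopA_eq_foldB (fuel : Nat) :
    ∀ (cs : List Char) (i : Nat) (acc : List Int) (buf : List Char),
      cs.Pairwise (fun a b => a = '0' → b = '0' ∨ b = '1') →
      cs.length - i ≤ fuel → i ≤ cs.length →
      pvLoopA cs i acc = (List.foldl pvStepB (acc, 0, -1, buf) (cs.drop i)).1 := by
  induction fuel with
  | zero =>
    intro cs i acc buf _ hfuel hi
    have hie : i = cs.length := by omega
    rw [pvLoopA]
    simp [hie]
  | succ n ih =>
    intro cs i acc buf hpre hfuel hi
    by_cases hlt : i < cs.length
    · -- decompose the suffix: m leading zeros, then (maybe) a stop character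
      set m := pvZeros (cs.drop i) with hm
      have hmle : m ≤ cs.length - i := by
        have := pvZeros_le (cs.drop i); simpa [hm] using this
      have hsplit : cs.drop i = List.replicate m '0' ++ cs.drop (i + m) := by
        rw [hm]
        conv_lhs => rw [← List.take_append_drop (pvZeros (cs.drop i)) (cs.drop i)]
        rw [pvZeros_take (cs.drop i), List.drop_drop]
      by_cases hend : i + m < cs.length
      · -- stop character exists
        have hc : cs.drop (i + m) = cs[i + m] :: cs.drop (i + m + 1) :=
          List.drop_eq_getElem_cons hend
        set c := cs[i + m] with hcdef
        have hcne : c ≠ '0' := by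
          apply pvZeros_head (cs.drop i) c (cs.drop (i + m + 1))
          rw [← hm, ← List.drop_drop]
          simpa [Nat.add_comm] using hc
        by_cases hbig : cs.length < i + m + m + 1
        · -- incomplete code: A breaks, B starves mid-collection
          have hm1 : 1 ≤ m := by omega
          rw [pvLoopA, dif_pos hlt]
          simp only []
          rw [← hm, dif_pos hbig]
          rw [hsplit, stepB_zeros, hc, stepB_stop _ _ _ _ _ hcne]
          have hcoll : pvCollectB acc 0 ((0 : Int) + m + 1) [] c =
              (acc, 0, (m : Int), [c]) := by
            simp only [pvCollectB]
            rw [if_neg (by omega)]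
            rw [show ((0 : Int) + m + 1) - 1 = (m : Int) by ring]
            simp
          rw [hcoll, stepB_starved _ acc 0 (m : Int) [c] (by exact_mod_cast hm1)
            (by simp [List.length_drop]; omega)]
        · -- complete code: both read the same m+1 value characters
          have hfit : i + m + m + 1 ≤ cs.length := by omega
          set mid := (cs.drop (i + m + 1)).take m with hmid
          have hmidlen : mid.length = m := by
            simp [hmid]
            omega
          have htsplit : cs.drop (i + m + 1) = mid ++ cs.drop (i + m + m + 1) := by
            conv_lhs => rw [← List.take_append_drop m (cs.drop (i + m + 1))]
            rw [List.drop_drop]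
            congr 2
            omega
          have hval : PySem.List.slice cs (some ((i + m : Nat) : Int))
              (some ((i + m + m + 1 : Nat) : Int)) = c :: mid := by
            rw [PySem.List.slice_natCast]
            have h5 : i + m + m + 1 - (i + m) = m + 1 := by omega
            rw [h5, hc, List.take_succ_cons, hmid]
          rw [pvLoopA, dif_pos hlt]
          simp only []
          rw [← hm, dif_neg (not_lt.mpr hfit)]
          rw [hsplit, stepB_zeros, hc, htsplit, stepB_stop _ _ _ _ _ hcne]
          rw [show ((0 : Int) + m + 1) = (mid.length : Int) + 1 by
            rw [hmidlen]; ring]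
          rw [stepB_collect mid (cs.drop (i + m + m + 1)) acc 0 [] c]
          simp only [List.nil_append]
          have hclean : c = '1' → ∀ x ∈ mid, x = '0' ∨ x = '1' := by
            intro _ x hx
            rcases Nat.eq_zero_or_pos m with hm0 | hm1
            · rw [hmid] at hx
              simp [hm0] at hx
            · have hdrop : (cs.drop i).Pairwise
                  (fun a b => a = '0' → b = '0' ∨ b = '1') :=
                hpre.sublist (List.drop_sublist _ _)
              have hrep : List.replicate m '0' = '0' :: List.replicate (m - 1) '0' := by
                conv_lhs => rw [show m = (m - 1) + 1 by omega, List.replicate_succ]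
              rw [hsplit, hrep, List.cons_append, List.pairwise_cons] at hdrop
              apply hdrop.1 x _ rfl
              rw [List.mem_append, hc]
              right
              right
              exact List.mem_of_mem_take (hmid ▸ hx)
          rw [hval, append_eq_emit acc c mid hclean]
          exact ih cs (i + m + m + 1) (pvEmitB acc (c :: mid)) (c :: mid)
            hpre (by omega) (by omega)
      · -- only zeros remain: A breaks, B ends in the zero-counting state
        have hieq : i + m = cs.length := by omega
        rw [pvLoopA, dif_pos hlt]
        simp only []
        rw [← hm, dif_pos (by omega)]
        rw [hsplit, stepB_zeros, List.drop_eq_nil_of_le (by omega)]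
        simp
    · have hd : cs.length ≤ i := by omega
      rw [pvLoopA]
      simp [hlt, List.drop_eq_nil_of_le hd]

-- ===== VERDICT (by name: the statement is the Claim_ definition above) =====
theorem exp_golomb_decode_unsigned_spec : Claim_equal_exp_golomb_decode_unsigned := by
  intro s _ hPre
  unfold Pre_exp_golomb_decode_unsigned at hPre
  unfold Spec_exp_golomb_decode_unsigned exp_golomb_decode_unsigned
    exp_golomb_decode_unsigned_alt
  by_cases h : s.toList.isEmpty
  · rw [if_pos h]
    rw [List.isEmpty_iff] at h
    simp [h]
  · rw [if_neg h]
    simpa using loopA_eq_foldB s.toList.length s.toList 0 [] [] hPre (by omega) (by omega)
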